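-- pv_equiv track=rewrite | github.com/yellalingh-margonda/Python-DSA | recurssion/007_subsequens_sum.py | sub_sum
-- ===== SOURCE A (Python) =====
-- def sub_sum(array, target, path=None, current_total=0, index=0):
--     """
--     Recursively finds all subsequences of the input array whose elements sum to the target value.
--
--     Args:
--         array (list): The input list of integers.
--         target (int): The desired sum.
--         path (list): Current combination being explored.
--         current_total (int): Running total of the current path.
--         index (int): Current index in the array.
--
--     Returns:
--         list: A list of valid subsequences whose sum equals the target.
--     """
--     if path is None:
--         path = []
--
--     if current_total == target:
--         return [path[:]]
--
--     if index >= len(array) or current_total > target: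
--         return []
--
--     # Include current element
--     path.append(array[index])
--     include = sub_sum(array, target, path, current_total + array[index], index + 1)
--
--     # Exclude current element
--     path.pop()
--     exclude = sub_sum(array, target, path, current_total, index + 1)
--
--     return include + exclude
-- ===== SOURCE B (Python) =====
-- def sub_sum(array, target, path=None, current_total=0, index=0):
--     # Iterative DFS with an explicit stack; note: unlike A, this never mutates `path`
--     # (A appends/pops on it in place, net-unchanged); return value is identical.
--     start = list(path) if path is not None else []
--     results = []
--     stack = [(start, current_total, index)]
--     while stack:
--         p, total, i = stack.pop()
--         if total == target:
--             results.append(p)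
--             continue
--         if i >= len(array) or total > target:
--             continue
--         x = array[i]
--         stack.append((p, total, i + 1))          # exclude frame (explored later)
--         stack.append((p + [x], total + x, i + 1))  # include frame (explored first)
--     return results
-- ===== Notes on version B (the rewrite author's own statement) =====
-- stated objective: alternative
-- what changed: Replaces the include/exclude recursion (with in-place path mutation) by an iterative DFS over an explicit stack of (path, total, index) frames, collecting results in pop order; same asymptotic cost.
import Mathlib
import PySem

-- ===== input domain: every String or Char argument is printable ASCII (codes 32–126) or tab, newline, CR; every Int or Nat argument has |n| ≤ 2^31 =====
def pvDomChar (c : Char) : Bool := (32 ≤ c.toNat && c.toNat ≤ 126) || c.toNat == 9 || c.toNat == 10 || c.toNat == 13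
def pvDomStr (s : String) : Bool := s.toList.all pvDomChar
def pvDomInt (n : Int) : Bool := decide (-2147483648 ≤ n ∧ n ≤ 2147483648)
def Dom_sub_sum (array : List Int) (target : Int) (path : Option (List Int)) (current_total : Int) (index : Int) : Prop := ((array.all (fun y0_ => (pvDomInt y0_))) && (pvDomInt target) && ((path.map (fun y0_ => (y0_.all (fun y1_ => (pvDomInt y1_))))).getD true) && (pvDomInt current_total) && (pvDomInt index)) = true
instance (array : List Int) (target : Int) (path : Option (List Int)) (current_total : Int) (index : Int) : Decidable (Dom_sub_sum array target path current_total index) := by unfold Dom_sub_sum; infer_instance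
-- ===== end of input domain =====

-- B replaces A's include/exclude recursion by an iterative DFS over an explicit stack of
-- (path, total, index) frames (alternative decomposition, same cost); A mutates `path` in
-- place (net-unchanged), B never does — the equivalence proved is about the RETURN value.

-- ===== PORT A =====
-- A's recursion after the `path is None` normalisation; `path.append`/`path.pop` become
-- passing `path ++ [x]` to the include call and `path` unchanged to the exclude call (the
-- net effect of the mutation on the return value). `array[index]` is PySem.List.pyGet?;
-- its `none` case (Python IndexError) is excluded by Pre_sub_sum, the [] there is arbitrary.
def subGoA (array : List Int) (target : Int) (path : List Int) (current_total : Int) (index : Int) : List (List Int) :=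
  if current_total = target then [path]
  else if (array.length : Int) ≤ index ∨ target < current_total then []
  else match PySem.List.pyGet? array index with
    | none => []  -- Python raises IndexError here; outside Pre_sub_sum
    | some x =>
        subGoA array target (path ++ [x]) (current_total + x) (index + 1) ++
        subGoA array target path current_total (index + 1)
termination_by ((array.length : Int) - index).toNat
decreasing_by all_goals simp_all

def sub_sum (array : List Int) (target : Int) (path : Option (List Int)) (current_total : Int) (index : Int) : List (List Int) :=
  subGoA array target (path.getD []) current_total index

-- ===== PORT B =====
-- Source B's while-loop over the explicit stack; the Lean list's head is the top of the
-- Python stack, so Python's `append exclude; append include` becomes prepending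
-- `include :: exclude :: rest`, and `stack.pop()` is matching off the head.
def altLoop (array : List Int) (target : Int) (stack : List (List Int × Int × Int)) (results : List (List Int)) : List (List Int) :=
  match stack with
  | [] => results
  | (p, total, i) :: rest =>
    if total = target then altLoop array target rest (results ++ [p])
    else if (array.length : Int) ≤ i ∨ target < total then altLoop array target rest results
    else match PySem.List.pyGet? array i with
      | none => altLoop array target rest results  -- Python raises IndexError here; outside Pre_sub_sum
      | some x => altLoop array target ((p ++ [x], total + x, i + 1) :: (p, total, i + 1) :: rest) results
termination_by (stack.map (fun f => 3 ^ (((array.length : Int) - f.2.2).toNat))).sum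
decreasing_by
  · simp only [List.map_cons, List.sum_cons]
    exact Nat.lt_add_of_pos_left (Nat.one_le_pow _ _ (by norm_num))
  · simp only [List.map_cons, List.sum_cons]
    exact Nat.lt_add_of_pos_left (Nat.one_le_pow _ _ (by norm_num))
  · simp only [List.map_cons, List.sum_cons]
    exact Nat.lt_add_of_pos_left (Nat.one_le_pow _ _ (by norm_num))
  · rename_i _ hlim
    rw [not_or] at hlim
    obtain ⟨ha, _⟩ := hlim
    rw [not_le] at ha
    simp only [List.map_cons, List.sum_cons]
    have heq : ((array.length : Int) - i).toNat = ((array.length : Int) - (i + 1)).toNat + 1 := by omega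
    rw [heq, pow_succ]
    have h3 : (1:ℕ) ≤ 3 ^ (((array.length : Int) - (i + 1)).toNat) := Nat.one_le_pow _ _ (by norm_num)
    linarith

def sub_sum_alt (array : List Int) (target : Int) (path : Option (List Int)) (current_total : Int) (index : Int) : List (List Int) :=
  altLoop array target [((path.getD []), current_total, index)] []

-- ===== PRECONDITION & SPEC =====
-- Pre_ excludes exactly the inputs on which Python A raises IndexError (the first element
-- access array[index] has index < -len(array)); B raises there too.
def Pre_sub_sum (array : List Int) (target : Int) (path : Option (List Int)) (current_total : Int) (index : Int) : Prop :=
  ¬ (current_total < target ∧ index < -(array.length : Int))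
instance (array : List Int) (target : Int) (path : Option (List Int)) (current_total : Int) (index : Int) : Decidable (Pre_sub_sum array target path current_total index) := by unfold Pre_sub_sum; infer_instance

def pvWitness_sub_sum : List Int × Int × Option (List Int) × Int × Int := ([1, 2, 1], 3, none, 0, 0)

def Spec_sub_sum (array : List Int) (target : Int) (path : Option (List Int)) (current_total : Int) (index : Int) (out : List (List Int)) : Prop := out = sub_sum_alt array target path current_total index
instance (array : List Int) (target : Int) (path : Option (List Int)) (current_total : Int) (index : Int) (out : List (List Int)) : Decidable (Spec_sub_sum array target path current_total index out) := by unfold Spec_sub_sum; infer_instance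

-- ===== CLAIM (what is proved, stated in full; the proofs are below) =====
def Claim_equal_sub_sum : Prop := ∀ (array : List Int) (target : Int) (path : Option (List Int)) (current_total : Int) (index : Int), Dom_sub_sum array target path current_total index → Pre_sub_sum array target path current_total index → Spec_sub_sum array target path current_total index (sub_sum array target path current_total index)

-- ===== LEMMAS AND PROOFS =====

-- Loop invariant: the stack loop returns the results so far followed by the concatenation
-- of A's recursion applied to each pending frame, in pop order.
lemma altLoop_eq (array : List Int) (target : Int) :
    ∀ (stack : List (List Int × Int × Int)) (results : List (List Int)),
      altLoop array target stack results =
        results ++ (stack.map (fun f => subGoA array target f.1 f.2.1 f.2.2)).flatten := by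
  intro stack results
  fun_induction altLoop array target stack results with
  | case1 => simp
  | case2 res p i rest ih =>
      rw [ih]; simp only [List.map_cons, List.flatten_cons]
      rw [show subGoA array target p target i = [p] from by rw [subGoA.eq_def]; simp]
      simp
  | case3 res p total i rest h1 h2 ih =>
      rw [ih]; simp only [List.map_cons, List.flatten_cons]
      rw [show subGoA array target p total i = [] from by rw [subGoA.eq_def]; simp [h1, h2]]
      simp
  | case4 res p total i rest h1 h2 hget ih =>
      rw [ih]; simp only [List.map_cons, List.flatten_cons]
      rw [show subGoA array target p total i = [] from by rw [subGoA.eq_def]; simp [h1, h2, hget]]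
      simp
  | case5 res p total i rest h1 h2 x hget ih =>
      rw [ih]; simp only [List.map_cons, List.flatten_cons]
      rw [show subGoA array target p total i = subGoA array target (p ++ [x]) (total + x) (i + 1) ++ subGoA array target p total (i + 1) from by rw [subGoA.eq_def]; simp [h1, h2, hget]]
      simp

-- ===== VERDICT (by name: the statement is the Claim_ definition above) =====
theorem sub_sum_spec : Claim_equal_sub_sum := by
  intro array target path current_total index _ _
  unfold Spec_sub_sum sub_sum sub_sum_alt
  rw [altLoop_eq]; simp
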